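-- pv_equiv track=rewrite | github.com/Deiahri/BTTL | modifier_compiler.py | __valid_pattern
-- ===== SOURCE A (Python) =====
-- date_patterns = [
--     ['year', 'month', 'day', 'time'],           # 2022 march 23rd
--     ['month', 'day', 'year', 'time'],           # march 5th 1999
--     ['month', 'num', 'year', 'time'],
--     ['num', 'month', 'year', 'time'],
--     ['month', 'num', 'time'],
--     ['month', 'year', 'time'],                 # march 1999
--     ['week', 'month'],                 # 2nd week of march
--     ['week', 'year'],                  # 2nd week of 2023
--     ['time']                           # 5:30
-- ]
--
-- def __valid_pattern(pattern):
--     """Receives a pattern produced (usually) by compile_modifiers (current_pattern).\n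
--         The pattern is simplified, and then compared to patterns in date_patterns.\n
--         If the simplified version of the given pattern matches any pattern in date_patterns, returns True."""
--     simplified_pattern = []
--     for index, item in enumerate(pattern):
--         if len(simplified_pattern) == 0:
--             simplified_pattern.append(item)
--         else:
--             if simplified_pattern[len(simplified_pattern)-1] == item:
--                 pass
--             else:
--                 simplified_pattern.append(item)
--     valid_patterns = date_patterns.copy()
--     matching_valid_patterns = []
--     for pattern_index, pattern in enumerate(valid_patterns):
--         if len(pattern) >= len(simplified_pattern):
--             valid = True
--             for simplified_index in range(len(simplified_pattern)):
--                 if not pattern[simplified_index].lower() == simplified_pattern[simplified_index].lower():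
--                     valid = False
--             if valid:
--                 matching_valid_patterns.append(pattern)
--         else:
--             valid_patterns.pop(pattern_index)
--
--     if not matching_valid_patterns:
--         return False
--     return True
-- ===== SOURCE B (Python) =====
-- date_patterns = [
--     ['year', 'month', 'day', 'time'],           # 2022 march 23rd
--     ['month', 'day', 'year', 'time'],           # march 5th 1999
--     ['month', 'num', 'year', 'time'],
--     ['num', 'month', 'year', 'time'],
--     ['month', 'num', 'time'],
--     ['month', 'year', 'time'],                 # march 1999
--     ['week', 'month'],                 # 2nd week of march
--     ['week', 'year'],                  # 2nd week of 2023
--     ['time']                           # 5:30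
-- ]
--
-- # every lowercased prefix (as a tuple) of every date pattern, built once
-- _prefixes = {tuple(x.lower() for x in p[:k])
--              for p in date_patterns
--              for k in range(len(p) + 1)}
--
-- def __valid_pattern(pattern):
--     simplified = []
--     for item in pattern:
--         if not simplified or simplified[-1] != item:
--             simplified.append(item)
--     return tuple(x.lower() for x in simplified) in _prefixes
-- ===== Notes on version B (the rewrite author's own statement) =====
-- stated objective: simpler
-- what changed: A's per-candidate prefix scan over a list it mutates (pop) while enumerating is replaced by collapsing consecutive duplicates once and testing membership of the lowercased tuple in a prebuilt set of all lowercased prefixes of the date patterns.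
import Mathlib
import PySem

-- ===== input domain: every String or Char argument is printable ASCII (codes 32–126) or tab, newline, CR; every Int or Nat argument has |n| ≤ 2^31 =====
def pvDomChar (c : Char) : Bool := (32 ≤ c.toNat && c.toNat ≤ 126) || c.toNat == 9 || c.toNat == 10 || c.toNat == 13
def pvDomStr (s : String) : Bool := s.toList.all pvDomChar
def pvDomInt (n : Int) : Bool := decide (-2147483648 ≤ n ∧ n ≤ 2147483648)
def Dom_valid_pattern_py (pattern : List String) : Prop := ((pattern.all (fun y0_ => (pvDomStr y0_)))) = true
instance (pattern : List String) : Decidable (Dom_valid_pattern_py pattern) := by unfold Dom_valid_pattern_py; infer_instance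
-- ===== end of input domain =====

-- B replaces A's per-pattern prefix scan (with its index-shifting pop loop) by a single
-- membership test in a prebuilt set of all lowercased prefixes of the date patterns (objective: simpler).

-- ===== PORT A =====
-- module-level constant date_patterns
def datePatterns : List (List String) := [
  ["year", "month", "day", "time"],
  ["month", "day", "year", "time"],
  ["month", "num", "year", "time"],
  ["num", "month", "year", "time"],
  ["month", "num", "time"],
  ["month", "year", "time"],
  ["week", "month"],
  ["week", "year"],
  ["time"]]

-- first loop of A: build simplified_pattern
def aSimplify (pattern : List String) : List String :=
  pattern.foldl (fun sp item =>
    if sp.length = 0 then sp ++ [item]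
    else if sp.getD (sp.length - 1) "" == item then sp
    else sp ++ [item]) []

-- A's inner 'for simplified_index in range(...)' loop computing `valid`
def aCheck (s p : List String) : Bool :=
  (List.range s.length).foldl (fun v j =>
    if !(PySem.Str.lower (p.getD j "") == PySem.Str.lower (s.getD j "")) then false else v) true

-- A's 'for pattern_index, pattern in enumerate(valid_patterns)' loop: the list is mutated by
-- pop while being enumerated, so we carry the current list and the running index explicitly.
def aLoop (s : List String) (lst : List (List String)) (i : Nat)
    (matching : List (List String)) : List (List String) :=
  if h : i < lst.length then
    let p := lst[i]
    if s.length ≤ p.length then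
      aLoop s lst (i + 1) (if aCheck s p then matching ++ [p] else matching)
    else
      aLoop s (lst.eraseIdx i) (i + 1) matching
  else matching
termination_by lst.length - i
decreasing_by
  · omega
  · have hl : (lst.eraseIdx i).length = lst.length - 1 := by
      rw [List.length_eraseIdx]; simp [h]
    omega

def valid_pattern_py (pattern : List String) : Bool :=
  let s := aSimplify pattern
  let matching := aLoop s datePatterns 0 []
  if matching == [] then false else true

-- ===== PORT B =====
-- the prebuilt set of all lowercased prefixes of the date patterns
def bPrefixes : PySem.Set (List String) :=
  datePatterns.foldl (fun acc p =>
    (List.range (p.length + 1)).foldl (fun acc k =>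
      PySem.Set.add acc ((p.take k).map PySem.Str.lower)) acc) PySem.Set.empty

-- B's collapse of consecutive duplicates
def bSimplify (pattern : List String) : List String :=
  pattern.foldl (fun s item =>
    if s.isEmpty || !(s.getLast? == some item) then s ++ [item] else s) []

def valid_pattern_py_alt (pattern : List String) : Bool :=
  PySem.Set.contains bPrefixes ((bSimplify pattern).map PySem.Str.lower)

-- ===== PRECONDITION & SPEC =====
def Spec_valid_pattern_py (pattern : List String) (out : Bool) : Prop := out = valid_pattern_py_alt pattern
instance (pattern : List String) (out : Bool) : Decidable (Spec_valid_pattern_py pattern out) := by unfold Spec_valid_pattern_py; infer_instance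

-- ===== CLAIM (what is proved, stated in full; the proofs are below) =====
def Claim_equal_valid_pattern_py : Prop := ∀ (pattern : List String), Dom_valid_pattern_py pattern → Spec_valid_pattern_py pattern (valid_pattern_py pattern)

-- ===== LEMMAS AND PROOFS =====

-- the two duplicate-collapsing loops take the same step
theorem simplify_step_eq (sp : List String) (item : String) :
    (if sp.length = 0 then sp ++ [item]
     else if sp.getD (sp.length - 1) "" == item then sp
     else sp ++ [item])
    = (if sp.isEmpty || !(sp.getLast? == some item) then sp ++ [item] else sp) := by
  cases sp with
  | nil => simp
  | cons x xs =>
    obtain ⟨a, ha⟩ : ∃ a, (x :: xs).getLast? = some a := by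
      cases hx : (x :: xs).getLast? with
      | none => simp [List.getLast?_eq_none_iff] at hx
      | some a => exact ⟨a, rfl⟩
    have ha' : (x :: xs)[xs.length]? = some a := by
      rw [← ha, List.getLast?_eq_getElem?]; simp
    have hd : (x :: xs).getD (xs.length + 1 - 1) "" = a := by
      rw [List.getD_eq_getElem?_getD, show xs.length + 1 - 1 = xs.length from rfl, ha']
      rfl
    simp only [List.length_cons, List.isEmpty_cons, Bool.false_or, ha, hd]
    by_cases hai : a = item
    · simp [hai]
    · have hb : (a == item) = false := by simp [hai]
      simp [hb]

theorem simplify_eq (pattern : List String) : aSimplify pattern = bSimplify pattern := by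
  unfold aSimplify bSimplify
  exact PySem.List.foldl_congr_mem _ _ _ _ (fun sp item _ => simplify_step_eq sp item)

-- the combined guard A applies to one candidate pattern
def matchF (s p : List String) : Bool := decide (s.length ≤ p.length) && aCheck s p

theorem aCheck_eq_all (s p : List String) :
    aCheck s p = (List.range s.length).all
      (fun j => PySem.Str.lower (p.getD j "") == PySem.Str.lower (s.getD j "")) := by
  unfold aCheck
  rw [PySem.List.foldl_if_false_eq]
  simp [List.all_eq_not_any_not]

theorem datePatterns_sorted :
    List.Pairwise (fun a b : List String => b.length ≤ a.length) datePatterns := by decide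

theorem drop_eraseIdx_succ (lst : List (List String)) (i : Nat) (h : i < lst.length) :
    (lst.eraseIdx i).drop (i + 1) = lst.drop (i + 2) := by
  rw [List.eraseIdx_eq_take_drop_succ, List.drop_append]
  have ht : (lst.take i).length = i := by simp [Nat.le_of_lt h]
  rw [ht]
  have h1 : (lst.take i).drop (i + 1) = [] :=
    List.drop_eq_nil_of_le (by rw [ht]; omega)
  rw [h1, List.nil_append, List.drop_drop]
  congr 1
  omega

theorem aLoop_eq (s : List String) :
    ∀ (n : Nat) (lst : List (List String)) (i : Nat) (m : List (List String)),
      lst.length - i ≤ n →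
      List.Pairwise (fun a b : List String => b.length ≤ a.length) lst →
      aLoop s lst i m = m ++ (lst.drop i).filter (matchF s) := by
  intro n
  induction n with
  | zero =>
    intro lst i m hn _
    rw [aLoop]
    have : ¬ i < lst.length := by omega
    simp [this, List.drop_eq_nil_of_le (by omega : lst.length ≤ i)]
  | succ n ih =>
    intro lst i m hn hp
    rw [aLoop]
    by_cases h : i < lst.length
    · simp only [h, dif_pos]
      have hdrop : lst.drop i = lst[i] :: lst.drop (i + 1) := List.drop_eq_getElem_cons h
      by_cases hlen : s.length ≤ lst[i].length
      · rw [if_pos hlen, ih lst (i + 1) _ (by omega) hp, hdrop, List.filter_cons]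
        have hm : matchF s lst[i] = aCheck s lst[i] := by
          simp [matchF, hlen]
        rw [hm]
        by_cases hc : aCheck s lst[i] = true
        · simp [hc]
        · simp [hc]
      · rw [if_neg hlen]
        have hps : List.Pairwise (fun a b : List String => b.length ≤ a.length) (lst.eraseIdx i) :=
          hp.sublist (List.eraseIdx_sublist lst i)
        have hlen' : (lst.eraseIdx i).length = lst.length - 1 := by
          rw [List.length_eraseIdx]; simp [h]
        rw [ih (lst.eraseIdx i) (i + 1) m (by omega) hps, drop_eraseIdx_succ lst i h]
        congr 1
        have hmi : matchF s lst[i] = false := by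
          simp [matchF]; intro hle; omega
        by_cases h2 : i + 1 < lst.length
        · have hord : lst[i + 1].length ≤ lst[i].length :=
            (List.pairwise_iff_getElem.mp hp) i (i + 1) h h2 (by omega)
          have hmi2 : matchF s lst[i + 1] = false := by
            simp [matchF]; intro hle; omega
          rw [hdrop, List.drop_eq_getElem_cons h2, List.filter_cons, List.filter_cons,
            hmi, hmi2]
          simp
        · have ha' : lst.drop (i + 1) = [] := List.drop_eq_nil_of_le (by omega)
          have hb' : lst.drop (i + 2) = [] := List.drop_eq_nil_of_le (by omega)
          rw [hdrop, ha', hb']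
          simp [hmi]
    · simp [h, List.drop_eq_nil_of_le (by omega : lst.length ≤ i)]

theorem matchF_iff (s p : List String) :
    matchF s p = true ↔
      s.length ≤ p.length ∧
        s.map PySem.Str.lower = (p.take s.length).map PySem.Str.lower := by
  unfold matchF
  rw [Bool.and_eq_true, decide_eq_true_iff, aCheck_eq_all]
  constructor
  · rintro ⟨hle, hall⟩
    refine ⟨hle, ?_⟩
    apply List.ext_getElem
    · simp [Nat.min_eq_left hle]
    · intro j hj hj2
      simp only [List.getElem_map, List.getElem_take]
      have hjs : j < s.length := by simpa using hj
      have hjp : j < p.length := by omega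
      have := List.all_eq_true.mp hall j (List.mem_range.mpr hjs)
      rw [List.getD_eq_getElem s "" hjs, List.getD_eq_getElem p "" hjp] at this
      exact (beq_iff_eq.mp this).symm
  · rintro ⟨hle, heq⟩
    refine ⟨hle, ?_⟩
    apply List.all_eq_true.mpr
    intro j hj
    have hjs : j < s.length := List.mem_range.mp hj
    have hjp : j < p.length := by omega
    have h1 := congrArg (fun l => l[j]?) heq
    simp only [List.getElem?_map, List.getElem?_take, hjs, if_pos] at h1
    rw [List.getElem?_eq_getElem hjs, List.getElem?_eq_getElem hjp] at h1
    simp only [Option.map_some] at h1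
    rw [List.getD_eq_getElem s "" hjs, List.getD_eq_getElem p "" hjp]
    exact beq_iff_eq.mpr (Option.some_injective _ h1).symm

theorem prefix_iff (t p : List String) :
    (t.length ≤ p.length ∧ t = (p.take t.length).map PySem.Str.lower) ↔
      ∃ k ∈ List.range (p.length + 1), t = (p.take k).map PySem.Str.lower := by
  constructor
  · rintro ⟨hle, heq⟩
    exact ⟨t.length, List.mem_range.mpr (by omega), heq⟩
  · rintro ⟨k, hk, heq⟩
    have hk' : k ≤ p.length := by
      have := List.mem_range.mp hk; omega
    have hlt : t.length = k := by
      rw [heq]; simp [Nat.min_eq_left hk']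
    subst hlt
    exact ⟨by omega, heq⟩

theorem mem_bPrefixes_fold (t : List String) (ps : List (List String))
    (acc : PySem.Set (List String)) :
    t ∈ ps.foldl (fun acc p =>
        (List.range (p.length + 1)).foldl (fun acc k =>
          PySem.Set.add acc ((p.take k).map PySem.Str.lower)) acc) acc ↔
      t ∈ acc ∨ ∃ p ∈ ps, ∃ k ∈ List.range (p.length + 1),
        t = (p.take k).map PySem.Str.lower := by
  induction ps generalizing acc with
  | nil => simp
  | cons p ps ih =>
    rw [List.foldl_cons, ih, PySem.Set.mem_foldl_add]
    constructor
    · rintro (⟨h | ⟨k, hk, hkeq⟩⟩ | ⟨q, hq, hrest⟩)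
      · exact Or.inl h
      · exact Or.inr ⟨p, by simp, k, hk, hkeq⟩
      · exact Or.inr ⟨q, by simp [hq], hrest⟩
    · rintro (h | ⟨q, hq, k, hk, hkeq⟩)
      · exact Or.inl (Or.inl h)
      · rcases List.mem_cons.mp hq with rfl | hq'
        · exact Or.inl (Or.inr ⟨k, hk, hkeq⟩)
        · exact Or.inr ⟨q, hq', k, hk, hkeq⟩

-- ===== VERDICT (by name: the statement is the Claim_ definition above) =====
theorem valid_pattern_py_spec : Claim_equal_valid_pattern_py := by
  intro pattern _
  unfold Spec_valid_pattern_py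
  show valid_pattern_py pattern = valid_pattern_py_alt pattern
  simp only [valid_pattern_py, valid_pattern_py_alt]
  rw [← simplify_eq]
  set s := aSimplify pattern with hs
  rw [aLoop_eq s (datePatterns.length) datePatterns 0 [] (by omega) datePatterns_sorted]
  simp only [List.drop_zero, List.nil_append]
  apply Bool.eq_iff_iff.mpr
  constructor
  · intro h
    have hne : datePatterns.filter (matchF s) ≠ [] := by
      intro hnil
      simp [hnil] at h
    obtain ⟨p, hp, hm⟩ : ∃ p ∈ datePatterns, matchF s p = true := by
      by_contra hbad
      push Not at hbad
      exact hne (List.filter_eq_nil_iff.mpr (fun a ha => by simp [hbad a ha]))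
    rw [PySem.Set.contains_iff]
    unfold bPrefixes
    rw [mem_bPrefixes_fold]
    obtain ⟨hle, heq⟩ := (matchF_iff s p).mp hm
    refine Or.inr ⟨p, hp, ?_⟩
    rw [← prefix_iff]
    constructor
    · simpa using hle
    · simpa using heq
  · intro h
    rw [PySem.Set.contains_iff] at h
    unfold bPrefixes at h
    rw [mem_bPrefixes_fold] at h
    rcases h with h | ⟨p, hp, hk⟩
    · simp [PySem.Set.empty] at h
    · rw [← prefix_iff] at hk
      obtain ⟨hle, heq⟩ := hk
      have hm : matchF s p = true := by
        rw [matchF_iff]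
        exact ⟨by simpa using hle, by simpa using heq⟩
      have : p ∈ datePatterns.filter (matchF s) := List.mem_filter.mpr ⟨hp, hm⟩
      have hne : datePatterns.filter (matchF s) ≠ [] := by
        intro hnil; rw [hnil] at this; exact (List.not_mem_nil).elim this
      simp [hne]
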